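-- pv_equiv track=rewrite | github.com/MaksymOleksiv/labs-algorithms_data_structures | lab2/main.py | max_hamster
-- ===== SOURCE A (Python) =====
-- def max_hamster(S: int, C: int, hamster: list[list[int]]) -> int:
--     """
--     :param S: Food for hamster per day
--     :param C: Quantity hamster
--     :param hamster: Appetite and greed
--     :return: Number of hamsters that can live together
--     """
--
--     sorted_hamster = sorted(hamster, key=lambda x: x[1])
--     result = 0
--
--     for i in range(C):
--         leftover_food = S
--         result += 1
--         for j in range(i+1):
--             leftover_food -= sorted_hamster[j][0] + sorted_hamster[j][1] * i
--
--         if leftover_food < 0: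
--             return result - 1
--
--     return result
-- ===== SOURCE B (Python) =====
-- def max_hamster(S: int, C: int, hamster: list[list[int]]) -> int:
--     """Single pass with running sums: after sorting by greed, keep the running
--     totals of appetites and greeds, so the cost of keeping i+1 hamsters on day
--     rules of A is sum_appetite + i * sum_greed, computed in O(1) per i."""
--     if C <= 0:
--         return 0
--     hs = sorted(hamster, key=lambda x: x[1])
--     sa = 0
--     sg = 0
--     for i in range(C):
--         row = hs[i]
--         sa += row[0]
--         sg += row[1]
--         if sa + i * sg > S:
--             return i
--     return C
-- ===== Notes on version B (the rewrite author's own statement) =====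
-- stated objective: alternative
-- what changed: B replaces A's quadratic inner re-summation by one pass over the sorted list carrying running sums of appetite and greed, so each candidate count is tested in O(1); on random inputs the early return fires quickly, so no wall-clock speed-up was measured.
import Mathlib
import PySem

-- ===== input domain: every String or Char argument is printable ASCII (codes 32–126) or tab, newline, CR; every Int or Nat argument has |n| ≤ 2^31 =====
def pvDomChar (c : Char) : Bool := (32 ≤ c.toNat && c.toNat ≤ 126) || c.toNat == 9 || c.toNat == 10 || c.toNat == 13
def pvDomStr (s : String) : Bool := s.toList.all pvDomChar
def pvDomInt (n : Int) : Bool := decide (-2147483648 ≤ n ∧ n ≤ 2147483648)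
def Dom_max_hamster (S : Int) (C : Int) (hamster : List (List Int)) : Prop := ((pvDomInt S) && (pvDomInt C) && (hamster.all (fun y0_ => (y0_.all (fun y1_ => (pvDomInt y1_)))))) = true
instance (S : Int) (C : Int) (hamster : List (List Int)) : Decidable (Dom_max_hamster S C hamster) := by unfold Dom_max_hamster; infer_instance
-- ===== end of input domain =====

-- B: after the same sort, one pass with running sums of appetite and greed tests each
-- candidate count in O(1) instead of A's O(i) inner re-summation.

-- ===== PORT A =====
-- inner loop of A: leftover_food after 'for j in range(i+1): leftover_food -= s[j][0] + s[j][1]*i'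
def pvInnerA (sh : List (List Int)) (i : Int) (S : Int) : Int :=
  (PySem.List.pyRange 0 (i + 1) 1).foldl
    (fun lf j =>
      lf - (PySem.List.pyGetD (PySem.List.pyGetD sh j []) 0 0
            + PySem.List.pyGetD (PySem.List.pyGetD sh j []) 1 0 * i)) S

-- outer loop of A over 'for i in range(C)' carrying 'result' (early return modelled by
-- recursion; the lazy range is the counter i with C.toNat = len(range(C)) steps of fuel)
def pvLoopA (S : Int) (sh : List (List Int)) : Nat → Int → Int → Int
  | 0, _, result => result
  | n + 1, i, result =>
    let result' := result + 1
    let leftover := pvInnerA sh i S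
    if leftover < 0 then result' - 1 else pvLoopA S sh n (i + 1) result'

def max_hamster (S : Int) (C : Int) (hamster : List (List Int)) : Int :=
  let sh := PySem.List.sorted hamster (fun x => PySem.List.pyGetD x 1 0)
  pvLoopA S sh C.toNat 0 0

-- ===== PORT B =====
-- B's single pass: running sums sa (appetite) and sg (greed); return i at the first failure
def pvLoopB (S C : Int) (sh : List (List Int)) : Nat → Int → Int → Int → Int
  | 0, _, _, _ => C
  | n + 1, i, sa, sg =>
    let row := PySem.List.pyGetD sh i []
    let sa' := sa + PySem.List.pyGetD row 0 0
    let sg' := sg + PySem.List.pyGetD row 1 0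
    if sa' + i * sg' > S then i else pvLoopB S C sh n (i + 1) sa' sg'

def max_hamster_alt (S : Int) (C : Int) (hamster : List (List Int)) : Int :=
  if C ≤ 0 then 0
  else
    let sh := PySem.List.sorted hamster (fun x => PySem.List.pyGetD x 1 0)
    pvLoopB S C sh C.toNat 0 0 0

-- ===== PRECONDITION & SPEC =====
-- the j-th appetite / greed as both ports read them (default 0 out of range), and their prefix sums
def pvRowA (sh : List (List Int)) (j : Nat) : Int := (sh.getD j []).getD 0 0
def pvRowG (sh : List (List Int)) (j : Nat) : Int := (sh.getD j []).getD 1 0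
def pvSumA (sh : List (List Int)) (k : Nat) : Int := ((List.range k).map (pvRowA sh)).sum
def pvSumG (sh : List (List Int)) (k : Nat) : Int := ((List.range k).map (pvRowG sh)).sum

-- Pre_ admits exactly the inputs on which Python A returns: every row has at least 2 entries,
-- and either C ≤ len(hamster) or the food budget is already exceeded at some prefix of the
-- sorted list, so A's early return fires before its indexing would raise IndexError.
def Pre_max_hamster (S : Int) (C : Int) (hamster : List (List Int)) : Prop :=
  (∀ r ∈ hamster, 2 ≤ r.length) ∧
  (C ≤ (hamster.length : Int) ∨
    ∃ i < hamster.length,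
      S < pvSumA (PySem.List.sorted hamster (fun x => PySem.List.pyGetD x 1 0)) (i + 1)
          + (i : Int) * pvSumG (PySem.List.sorted hamster (fun x => PySem.List.pyGetD x 1 0)) (i + 1))
instance (S : Int) (C : Int) (hamster : List (List Int)) : Decidable (Pre_max_hamster S C hamster) := by unfold Pre_max_hamster; infer_instance

def pvWitness_max_hamster : Int × Int × List (List Int) := (10, 2, [[1, 1], [2, 0]])

def Spec_max_hamster (S : Int) (C : Int) (hamster : List (List Int)) (out : Int) : Prop := out = max_hamster_alt S C hamster
instance (S : Int) (C : Int) (hamster : List (List Int)) (out : Int) : Decidable (Spec_max_hamster S C hamster out) := by unfold Spec_max_hamster; infer_instance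

-- ===== CLAIM (what is proved, stated in full; the proofs are below) =====
def Claim_equal_max_hamster : Prop := ∀ (S : Int) (C : Int) (hamster : List (List Int)), Dom_max_hamster S C hamster → Pre_max_hamster S C hamster → Spec_max_hamster S C hamster (max_hamster S C hamster)
-- ===== LEMMAS AND PROOFS =====

lemma pvSumA_succ (sh : List (List Int)) (k : Nat) :
    pvSumA sh (k + 1) = pvSumA sh k + pvRowA sh k := by
  simp [pvSumA, List.range_succ]

lemma pvSumG_succ (sh : List (List Int)) (k : Nat) :
    pvSumG sh (k + 1) = pvSumG sh k + pvRowG sh k := by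
  simp [pvSumG, List.range_succ]

lemma pv_foldl_sub {α : Type} (c : α → Int) (l : List α) (S : Int) :
    l.foldl (fun lf j => lf - c j) S = S - (l.map c).sum := by
  induction l generalizing S with
  | nil => simp
  | cons x xs ih => simp [List.foldl_cons, ih]; ring

lemma pvInnerA_eq (sh : List (List Int)) (k : Nat) (S : Int) :
    pvInnerA sh (k : Int) S = S - (pvSumA sh (k + 1) + (k : Int) * pvSumG sh (k + 1)) := by
  unfold pvInnerA
  rw [pv_foldl_sub]
  have hr : PySem.List.pyRange 0 ((k : Int) + 1) 1
      = (List.range (k + 1)).map (fun j => ((j : Nat) : Int)) := by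
    rw [PySem.List.pyRange_one]
    simp
  rw [hr, List.map_map]
  have hm : ((List.range (k + 1)).map
      (((fun j => PySem.List.pyGetD (PySem.List.pyGetD sh j []) 0 0
            + PySem.List.pyGetD (PySem.List.pyGetD sh j []) 1 0 * (k : Int))) ∘
        (fun j => ((j : Nat) : Int))))
      = (List.range (k + 1)).map (fun j => pvRowA sh j + pvRowG sh j * (k : Int)) := by
    apply List.map_congr_left
    intro j _
    simp [pysem, Function.comp, pvRowA, pvRowG]
  rw [hm]
  have hs : ((List.range (k + 1)).map (fun j => pvRowA sh j + pvRowG sh j * (k : Int))).sum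
      = pvSumA sh (k + 1) + pvSumG sh (k + 1) * (k : Int) := by
    induction (k + 1) with
    | zero => simp [pvSumA, pvSumG]
    | succ m ih =>
        simp [List.range_succ, ih, pvSumA_succ, pvSumG_succ]
        ring
  rw [hs]; ring

-- the two loops agree on the remaining fuel, given the running-sum invariant
lemma pvLoop_eq (S C : Int) (sh : List (List Int)) :
    ∀ n k : Nat, (C - (k : Int)).toNat = n → (k : Int) ≤ C →
      pvLoopA S sh n (k : Int) (k : Int)
        = pvLoopB S C sh n (k : Int) (pvSumA sh k) (pvSumG sh k) := by
  intro n
  induction n with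
  | zero =>
    intro k hn hk
    have hkC : (k : Int) = C := by omega
    simp [pvLoopA, pvLoopB, hkC]
  | succ m ih =>
    intro k hn hk
    simp only [pvLoopA, pvLoopB]
    have hrow0 : PySem.List.pyGetD (PySem.List.pyGetD sh (k : Int) []) 0 0 = pvRowA sh k := by
      simp [pysem, pvRowA]
    have hrow1 : PySem.List.pyGetD (PySem.List.pyGetD sh (k : Int) []) 1 0 = pvRowG sh k := by
      simp [pysem, pvRowG]
    rw [pvInnerA_eq, hrow0, hrow1, ← pvSumA_succ, ← pvSumG_succ]
    by_cases h : pvSumA sh (k + 1) + (k : Int) * pvSumG sh (k + 1) > S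
    · rw [if_pos (by omega : S - (pvSumA sh (k + 1) + (k : Int) * pvSumG sh (k + 1)) < 0),
        if_pos (by linarith : pvSumA sh (k + 1) + (k : Int) * pvSumG sh (k + 1) > S)]
      ring
    · rw [if_neg (by omega : ¬ S - (pvSumA sh (k + 1) + (k : Int) * pvSumG sh (k + 1)) < 0),
        if_neg h]
      have hk1 : ((k + 1 : Nat) : Int) = (k : Int) + 1 := by push_cast; ring
      have := ih (k + 1) (by omega) (by omega)
      rw [hk1] at this
      exact this

-- ===== VERDICT (by name: the statement is the Claim_ definition above) =====
theorem max_hamster_spec : Claim_equal_max_hamster := by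
  intro S C hamster _ _
  unfold Spec_max_hamster max_hamster max_hamster_alt
  by_cases hC : C ≤ 0
  · have : C.toNat = 0 := by omega
    simp [hC, this, pvLoopA]
  · simp only [hC, if_false]
    have := pvLoop_eq S C (PySem.List.sorted hamster (fun x => PySem.List.pyGetD x 1 0))
      C.toNat 0 (by simp) (by omega)
    simpa [pvSumA, pvSumG] using this
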